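-- pv_equiv track=rewrite | github.com/gems-uff/sbcr | sbcr.py | candidate_has_partial_order
-- ===== SOURCE A (Python) =====
-- def candidate_has_partial_order(v1,v2, candidate):
--
--     last_v1_index = -1
--     last_v2_index = -1
--     for candidate_element in candidate:
--         line_side = candidate_element[0]
--         line_index = candidate_element[1]
--         if line_side == 'v1':
--             if line_index < last_v1_index:
--                 return False
--             last_v1_index = line_index
--         else:
--             if line_index < last_v2_index:
--                 return False
--             last_v2_index = line_index
--     return True
-- ===== SOURCE B (Python) =====
-- def _nondecreasing(indices):
--     return all(a <= b for a, b in zip(indices, indices[1:]))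
--
--
-- def candidate_has_partial_order(v1, v2, candidate):
--     v1_indices = [i for side, i in candidate if side == 'v1']
--     v2_indices = [i for side, i in candidate if side != 'v1']
--     return _nondecreasing(v1_indices) and _nondecreasing(v2_indices)
-- ===== Notes on version B (the rewrite author's own statement) =====
-- stated objective: simpler
-- what changed: Replaces the single interleaved pass with two running-maximum registers (seeded with -1) by partitioning the candidate into the two sides' index lists and checking each list non-decreasing via adjacent-pair comparison.
-- intended difference: On candidates whose per-side indices are in non-decreasing order but whose first index on some side is below -1, A returns False (an artefact of its -1 sentinel seed) while B returns True, which is intended since no earlier index on that side exists to violate the order. — e.g. on candidate_has_partial_order([], [], [("v1", -2)]): A returns false, B returns true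
import Mathlib
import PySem

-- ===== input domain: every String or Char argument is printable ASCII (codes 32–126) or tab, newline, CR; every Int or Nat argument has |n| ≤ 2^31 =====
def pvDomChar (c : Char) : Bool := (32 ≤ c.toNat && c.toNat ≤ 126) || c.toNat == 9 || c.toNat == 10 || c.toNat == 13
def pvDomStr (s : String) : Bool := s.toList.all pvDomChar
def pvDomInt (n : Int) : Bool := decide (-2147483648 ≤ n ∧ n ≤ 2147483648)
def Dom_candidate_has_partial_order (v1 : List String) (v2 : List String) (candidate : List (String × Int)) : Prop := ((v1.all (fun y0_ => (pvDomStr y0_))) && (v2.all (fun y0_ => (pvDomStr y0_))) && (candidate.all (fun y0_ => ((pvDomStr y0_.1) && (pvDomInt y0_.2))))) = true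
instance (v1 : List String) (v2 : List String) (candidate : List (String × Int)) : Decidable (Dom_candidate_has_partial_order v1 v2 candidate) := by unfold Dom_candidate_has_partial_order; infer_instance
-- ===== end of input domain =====

-- B replaces A's interleaved pass with two -1-seeded running maxima by a partition into the
-- two sides' index lists followed by adjacent-pair non-decreasing checks (objective: simpler).

-- ===== PORT A =====
-- loop of A: state = (last_v1_index, last_v2_index), early return False on a violation
def pvGoA : List (String × Int) → Int → Int → Bool
  | [], _, _ => true
  | (line_side, line_index) :: rest, lastV1, lastV2 =>
    if line_side == "v1" then
      if line_index < lastV1 then false else pvGoA rest line_index lastV2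
    else
      if line_index < lastV2 then false else pvGoA rest lastV1 line_index

def candidate_has_partial_order (v1 : List String) (v2 : List String) (candidate : List (String × Int)) : Bool :=
  pvGoA candidate (-1) (-1)

-- ===== PORT B =====
-- all(a <= b for a, b in zip(indices, indices[1:]))
def pvNondecr (indices : List Int) : Bool :=
  (indices.zip indices.tail).all (fun p => decide (p.1 ≤ p.2))

def candidate_has_partial_order_alt (v1 : List String) (v2 : List String) (candidate : List (String × Int)) : Bool :=
  pvNondecr ((candidate.filter (fun p => p.1 == "v1")).map Prod.snd)
  && pvNondecr ((candidate.filter (fun p => !(p.1 == "v1"))).map Prod.snd)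

-- ===== PRECONDITION & SPEC =====
-- On candidates whose elements are, pairwise in list order, non-decreasing within each side
-- but which contain an index below -1 (necessarily the first index of its side), A returns
-- False (an artefact of its -1 sentinel) while B returns True, which is intended since no
-- earlier index on that side exists to violate the order.
def D_candidate_has_partial_order (v1 : List String) (v2 : List String) (candidate : List (String × Int)) : Prop :=
  List.Pairwise (fun p q => (p.1 == "v1") = (q.1 == "v1") → p.2 ≤ q.2) candidate ∧
  ∃ p ∈ candidate, p.2 < -1
instance (v1 : List String) (v2 : List String) (candidate : List (String × Int)) : Decidable (D_candidate_has_partial_order v1 v2 candidate) := by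
  unfold D_candidate_has_partial_order; infer_instance

def Spec_candidate_has_partial_order (v1 : List String) (v2 : List String) (candidate : List (String × Int)) (out : Bool) : Prop := ¬ D_candidate_has_partial_order v1 v2 candidate → out = candidate_has_partial_order_alt v1 v2 candidate
instance (v1 : List String) (v2 : List String) (candidate : List (String × Int)) (out : Bool) : Decidable (Spec_candidate_has_partial_order v1 v2 candidate out) := by unfold Spec_candidate_has_partial_order; infer_instance

def pvDiffWitness_candidate_has_partial_order : List String × List String × (List (String × Int)) := ([], [], [("v1", -2)])
def pvDiffWitnessOut_candidate_has_partial_order : Bool × Bool := (false, true)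

-- ===== CLAIM (what is proved, stated in full; the proofs are below) =====
def Claim_unchanged_candidate_has_partial_order : Prop := ∀ (v1 : List String) (v2 : List String) (candidate : List (String × Int)), Dom_candidate_has_partial_order v1 v2 candidate → Spec_candidate_has_partial_order v1 v2 candidate (candidate_has_partial_order v1 v2 candidate)
def Claim_changed_candidate_has_partial_order : Prop := Dom_candidate_has_partial_order (pvDiffWitness_candidate_has_partial_order.1) (pvDiffWitness_candidate_has_partial_order.2.1) (pvDiffWitness_candidate_has_partial_order.2.2) ∧ D_candidate_has_partial_order (pvDiffWitness_candidate_has_partial_order.1) (pvDiffWitness_candidate_has_partial_order.2.1) (pvDiffWitness_candidate_has_partial_order.2.2) ∧ candidate_has_partial_order (pvDiffWitness_candidate_has_partial_order.1) (pvDiffWitness_candidate_has_partial_order.2.1) (pvDiffWitness_candidate_has_partial_order.2.2) = pvDiffWitnessOut_candidate_has_partial_order.1 ∧ candidate_has_partial_order_alt (pvDiffWitness_candidate_has_partial_order.1) (pvDiffWitness_candidate_has_partial_order.2.1) (pvDiffWitness_candidate_has_partial_order.2.2) = pvDiffWitnessOut_candidate_has_partial_order.2 ∧ pvDiffWitnessOut_candidate_has_partial_order.1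 ≠ pvDiffWitnessOut_candidate_has_partial_order.2
def Claim_exact_candidate_has_partial_order : Prop := ∀ (v1 : List String) (v2 : List String) (candidate : List (String × Int)), Dom_candidate_has_partial_order v1 v2 candidate → D_candidate_has_partial_order v1 v2 candidate → candidate_has_partial_order v1 v2 candidate ≠ candidate_has_partial_order_alt v1 v2 candidate

-- ===== LEMMAS AND PROOFS =====
-- proof-side sentinel chain: pvChain l xs = "l :: xs is non-decreasing"
def pvChain : Int → List Int → Bool
  | _, [] => true
  | l, x :: xs => decide (l ≤ x) && pvChain x xs

theorem pvGoA_eq_chain (c : List (String × Int)) : ∀ (l1 l2 : Int),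
    pvGoA c l1 l2 = (pvChain l1 ((c.filter (fun p => p.1 == "v1")).map Prod.snd)
      && pvChain l2 ((c.filter (fun p => !(p.1 == "v1"))).map Prod.snd)) := by
  induction c with
  | nil => intro l1 l2; simp [pvGoA, pvChain]
  | cons hd tl ih =>
    intro l1 l2
    obtain ⟨s, i⟩ := hd
    by_cases hs : s == "v1" <;>
      simp only [pvGoA, hs, if_true, Bool.not_true, Bool.not_false,
        List.filter_cons, List.map_cons, pvChain, ih] <;>
      by_cases hi : i < l1 <;> by_cases hi2 : i < l2 <;>
      simp_all

theorem pvChain_eq_nondecr (xs : List Int) : ∀ (x : Int), pvChain x xs = pvNondecr (x :: xs) := by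
  induction xs with
  | nil => intro x; simp [pvChain, pvNondecr]
  | cons y ys ih =>
    intro x
    rw [pvChain, ih y]
    simp [pvNondecr]

theorem pvNondecr_iff_chain (l : List Int) : pvNondecr l = true ↔ List.IsChain (· ≤ ·) l := by
  induction l with
  | nil => simp [pvNondecr]
  | cons x xs ih =>
    cases xs with
    | nil => simp [pvNondecr]
    | cons y ys =>
      rw [← pvChain_eq_nondecr, pvChain, pvChain_eq_nondecr]
      simp [List.isChain_cons_cons, ← ih]

-- head-check helper for the sentinel -1
def pvHeadOK : List Int → Bool
  | [] => true
  | x :: _ => decide (-1 ≤ x)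

theorem pvHeadOK_of_all (l : List Int) (h : ∀ x ∈ l, -1 ≤ x) : pvHeadOK l = true := by
  cases l with
  | nil => rfl
  | cons x xs => simpa [pvHeadOK] using h x List.mem_cons_self

theorem pvHeadOK_eq_false (l : List Int) (hne : l ≠ []) (hlt : l.headI < -1) : pvHeadOK l = false := by
  cases l with
  | nil => exact absurd rfl hne
  | cons x xs => simp only [List.headI] at hlt; simp [pvHeadOK]; omega

theorem pvSortedHead_le (l : List Int) (hs : List.Pairwise (· ≤ ·) l) (x : Int) (hx : x ∈ l) :
    l.headI ≤ x := by
  cases l with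
  | nil => cases hx
  | cons h t =>
    rcases List.mem_cons.mp hx with rfl | hx
    · exact le_refl _
    · exact (List.pairwise_cons.mp hs).1 x hx

-- the D_ pairwise condition on the raw candidate ≡ both projected index lists are chains
theorem pvPW_iff (c : List (String × Int)) :
    List.Pairwise (fun p q => (p.1 == "v1") = (q.1 == "v1") → p.2 ≤ q.2) c ↔
      (List.IsChain (· ≤ ·) ((c.filter (fun p => p.1 == "v1")).map Prod.snd) ∧
       List.IsChain (· ≤ ·) ((c.filter (fun p => !(p.1 == "v1"))).map Prod.snd)) := by
  rw [List.isChain_iff_pairwise, List.isChain_iff_pairwise, List.pairwise_map,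
    List.pairwise_filter, List.pairwise_map, List.pairwise_filter, ← List.pairwise_and_iff]
  constructor <;> intro h <;> refine h.imp ?_ <;> intro p q hpq <;>
    by_cases hp : p.1 == "v1" <;> by_cases hq : q.1 == "v1" <;> simp_all

theorem pvA_unfold (v1 v2 : List String) (c : List (String × Int)) :
    candidate_has_partial_order v1 v2 c
      = (pvChain (-1) ((c.filter (fun p => p.1 == "v1")).map Prod.snd)
        && pvChain (-1) ((c.filter (fun p => !(p.1 == "v1"))).map Prod.snd)) := by
  simp [candidate_has_partial_order, pvGoA_eq_chain]

theorem pvChain_neg1 (l : List Int) :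
    pvChain (-1) l = (pvHeadOK l && pvNondecr l) := by
  cases l with
  | nil => simp [pvChain, pvNondecr, pvHeadOK]
  | cons x xs => rw [pvChain, pvChain_eq_nondecr]; simp [pvHeadOK]

-- ===== VERDICT (by name: the statement is the Claim_ definition above) =====
theorem candidate_has_partial_order_spec : Claim_unchanged_candidate_has_partial_order := by
  intro v1 v2 c _dom hnd
  rw [pvA_unfold, pvChain_neg1, pvChain_neg1]
  unfold candidate_has_partial_order_alt
  unfold D_candidate_has_partial_order at hnd
  by_cases ha : pvNondecr ((c.filter (fun p => p.1 == "v1")).map Prod.snd) = true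
  · by_cases hb : pvNondecr ((c.filter (fun p => !(p.1 == "v1"))).map Prod.snd) = true
    · have hPW := (pvPW_iff c).mpr ⟨(pvNondecr_iff_chain _).mp ha, (pvNondecr_iff_chain _).mp hb⟩
      have hge : ∀ p ∈ c, -1 ≤ p.2 := by
        intro p hp
        by_contra hlt
        exact hnd ⟨hPW, p, hp, by omega⟩
      have hok : ∀ (f : String × Int → Bool),
          pvHeadOK ((c.filter f).map Prod.snd) = true := by
        intro f
        refine pvHeadOK_of_all _ ?_
        intro x hx
        rcases List.mem_map.mp hx with ⟨p, hp, rfl⟩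
        exact hge p (List.mem_of_mem_filter hp)
      rw [ha, hb, hok, hok]
      rfl
    · rw [Bool.not_eq_true] at hb
      simp [hb]
  · rw [Bool.not_eq_true] at ha
    simp [ha]

theorem candidate_has_partial_order_changed : Claim_changed_candidate_has_partial_order := by
  unfold Claim_changed_candidate_has_partial_order; decide

theorem candidate_has_partial_order_tight : Claim_exact_candidate_has_partial_order := by
  intro v1 v2 c _dom hd
  obtain ⟨hPW, p, hpmem, hplt⟩ := hd
  obtain ⟨hca, hcb⟩ := (pvPW_iff c).mp hPW
  have ha := (pvNondecr_iff_chain _).mpr hca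
  have hb := (pvNondecr_iff_chain _).mpr hcb
  rw [pvA_unfold, pvChain_neg1, pvChain_neg1]
  unfold candidate_has_partial_order_alt
  rw [ha, hb]
  by_cases hside : p.1 == "v1"
  · have hmem : p.2 ∈ (c.filter (fun q => q.1 == "v1")).map Prod.snd :=
      List.mem_map.mpr ⟨p, List.mem_filter.mpr ⟨hpmem, hside⟩, rfl⟩
    have hx := pvHeadOK_eq_false _ (List.ne_nil_of_mem hmem)
      (lt_of_le_of_lt (pvSortedHead_le _ (List.isChain_iff_pairwise.mp hca) _ hmem) hplt)
    simp [hx]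
  · have hmem : p.2 ∈ (c.filter (fun q => !(q.1 == "v1"))).map Prod.snd :=
      List.mem_map.mpr ⟨p, List.mem_filter.mpr ⟨hpmem, by simp [hside]⟩, rfl⟩
    have hx := pvHeadOK_eq_false _ (List.ne_nil_of_mem hmem)
      (lt_of_le_of_lt (pvSortedHead_le _ (List.isChain_iff_pairwise.mp hcb) _ hmem) hplt)
    simp [hx]
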